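-- pv_equiv track=rewrite | github.com/mb2g17/PyLex | misc.py | string_to_tiles
-- ===== SOURCE A (Python) =====
-- def string_to_tiles(str):
--     # Base case
--     if len(str) == 0:
--         return []
--
--     # Stores char in question
--     char = str[0]
--
--     # Stores what tile
--     tile = char
--
--     if len(str) >= 2 and char == 'q' and str[1] == 'u':
--         # Recursive case (if it is qu)
--         return ["qu"] + string_to_tiles(str[2:])
--     else:
--         # Recursive case
--         return [tile] + string_to_tiles(str[1:])
-- ===== SOURCE B (Python) =====
-- def string_to_tiles(str):
--     tiles = []
--     i = 0
--     n = len(str)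
--     while i < n:
--         if str[i] == 'q' and i + 1 < n and str[i + 1] == 'u':
--             tiles.append("qu")
--             i += 2
--         else:
--             tiles.append(str[i])
--             i += 1
--     return tiles
-- ===== Notes on version B (the rewrite author's own statement) =====
-- stated objective: faster
-- what changed: Replaced the recursion that slices the remaining string at every step with a single iterative index-based pass that appends tiles to an accumulator list.
import Mathlib
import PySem

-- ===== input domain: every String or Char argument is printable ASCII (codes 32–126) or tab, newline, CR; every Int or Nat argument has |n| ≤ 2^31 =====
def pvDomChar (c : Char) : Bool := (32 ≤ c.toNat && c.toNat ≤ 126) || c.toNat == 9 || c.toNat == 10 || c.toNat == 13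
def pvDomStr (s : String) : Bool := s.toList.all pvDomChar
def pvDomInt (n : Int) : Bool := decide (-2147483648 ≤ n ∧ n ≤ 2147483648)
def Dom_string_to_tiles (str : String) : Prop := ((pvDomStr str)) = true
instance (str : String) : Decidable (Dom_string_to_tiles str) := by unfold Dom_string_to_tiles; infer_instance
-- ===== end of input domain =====

-- B replaces A's recursion-with-slicing (quadratic) by one iterative index pass appending to an accumulator (linear).

-- ===== PORT A =====
-- A's recursion over the characters: base case on the empty string, then either
-- consume "qu" and recurse on str[2:] (= rest.tail) or consume one char and recurse on str[1:] (= rest).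
def tilesA (cs : List Char) : List String :=
  match cs with
  | [] => []
  | c :: rest =>
    -- char = str[0]; tile = char
    if (c :: rest).length ≥ 2 ∧ c = 'q' ∧ rest.headI = 'u' then
      "qu" :: tilesA rest.tail
    else
      String.ofList [c] :: tilesA rest
termination_by cs.length
decreasing_by
  all_goals simp [List.length_tail]

def string_to_tiles (str : String) : List String := tilesA str.toList

-- ===== PORT B =====
-- B's while-loop: index i, append "qu" and advance by 2, or append str[i] and advance by 1.
def tilesB (cs : List Char) (n : Nat) (i : Nat) (acc : List String) : List String :=
  if _h : i < n then
    match cs[i]? with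
    | some c =>
      if c = 'q' ∧ i + 1 < n ∧ cs[i+1]? = some 'u' then
        tilesB cs n (i + 2) (acc ++ ["qu"])
      else
        tilesB cs n (i + 1) (acc ++ [String.ofList [c]])
    | none => acc  -- unreachable: i < n = cs.length
  else acc
termination_by n - i

def string_to_tiles_alt (str : String) : List String :=
  tilesB str.toList str.toList.length 0 []

-- ===== PRECONDITION & SPEC =====
def Spec_string_to_tiles (str : String) (out : List String) : Prop := out = string_to_tiles_alt str
instance (str : String) (out : List String) : Decidable (Spec_string_to_tiles str out) := by unfold Spec_string_to_tiles; infer_instance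

-- ===== CLAIM (what is proved, stated in full; the proofs are below) =====
def Claim_equal_string_to_tiles : Prop := ∀ (str : String), Dom_string_to_tiles str → Spec_string_to_tiles str (string_to_tiles str)

-- ===== LEMMAS AND PROOFS =====

theorem tilesB_eq (cs : List Char) (i : Nat) (acc : List String) :
    tilesB cs cs.length i acc = acc ++ tilesA (cs.drop i) := by
  fun_induction tilesB cs cs.length i acc with
  | case1 i acc h c hc hcond ih =>
    -- "qu" branch
    rw [List.drop_eq_getElem_cons h]
    have hc' : cs[i] = c := by
      have := List.getElem?_eq_getElem h; rw [this] at hc; injection hc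
    obtain ⟨h1, h2, h3⟩ := hcond
    have hdrop : cs.drop (i+1) = cs[i+1] :: cs.drop (i+2) := List.drop_eq_getElem_cons h2
    have hu : cs[i+1] = 'u' := by
      have := List.getElem?_eq_getElem h2; rw [this] at h3; injection h3
    rw [tilesA]
    rw [if_pos]
    · rw [ih, List.tail_drop]
      simp only [List.append_assoc, List.singleton_append]
    · refine ⟨?_, by rw [hc']; exact h1, ?_⟩
      · rw [List.length_cons, List.length_drop]; omega
      · rw [hdrop, hu]; rfl
  | case2 i acc h c hc hcond ih =>
    -- single-char branch
    rw [List.drop_eq_getElem_cons h]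
    have hc' : cs[i] = c := by
      have := List.getElem?_eq_getElem h; rw [this] at hc; injection hc
    rw [tilesA]
    rw [if_neg]
    · rw [ih, hc']
      simp only [List.append_assoc, List.singleton_append]
    · intro ⟨h1, h2, h3⟩
      apply hcond
      refine ⟨by rw [← hc']; exact h2, ?_, ?_⟩
      · rw [List.length_cons, List.length_drop] at h1; omega
      · have h2' : i + 1 < cs.length := by
          rw [List.length_cons, List.length_drop] at h1; omega
        have hdrop : cs.drop (i+1) = cs[i+1] :: cs.drop (i+2) := List.drop_eq_getElem_cons h2'
        rw [hdrop, List.headI_cons] at h3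
        rw [List.getElem?_eq_getElem h2', h3]
  | case3 i acc h hc =>
    exfalso
    exact absurd (List.getElem?_eq_getElem h ▸ hc) (by simp)
  | case4 i acc h =>
    have : cs.drop i = [] := List.drop_eq_nil_of_le (by omega)
    simp [this, tilesA]

-- ===== VERDICT (by name: the statement is the Claim_ definition above) =====
theorem string_to_tiles_spec : Claim_equal_string_to_tiles := by
  intro str _
  unfold Spec_string_to_tiles string_to_tiles string_to_tiles_alt
  rw [tilesB_eq]
  simp
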